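-- pv_equiv track=rewrite | github.com/stradivari96/leetcode | amazon/multiprocessor_system.py | multiprocessor_system
-- ===== SOURCE A (Python) =====
-- import heapq
--
-- def multiprocessor_system(abilities, processes):
--     heap = [-a for a in abilities]
--     heapq.heapify(heap)
--
--     steps = 0
--     while processes > 0:
--         processor = -heapq.heappop(heap)
--         processes -= processor
--         heapq.heappush(heap, -(processor // 2))
--         steps += 1
--     return steps
-- ===== SOURCE B (Python) =====
-- def multiprocessor_system(abilities, processes):
--     # All values the greedy max-heap can ever subtract: each ability's halving chain.
--     vals = []
--     for a in abilities:
--         while a > 0: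
--             vals.append(a)
--             a //= 2
--     vals.sort(reverse=True)
--     steps = 0
--     for v in vals:
--         if processes <= 0:
--             break
--         processes -= v
--         steps += 1
--     return steps
-- ===== Notes on version B (the rewrite author's own statement) =====
-- stated objective: alternative
-- what changed: Replaces the step-by-step max-heap simulation (pop max, subtract, push its floored half) by precomputing every halving-chain value of the abilities, sorting them once in descending order, and doing one accumulating pass that counts how many values are needed; A's popped maxima come out in exactly this order.
-- outside the precondition, e.g. on multiprocessor_system([1], 10): A does not finish within the time limit, B returns 1; on multiprocessor_system([], 1): A raises IndexError, B returns 0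
import Mathlib
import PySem

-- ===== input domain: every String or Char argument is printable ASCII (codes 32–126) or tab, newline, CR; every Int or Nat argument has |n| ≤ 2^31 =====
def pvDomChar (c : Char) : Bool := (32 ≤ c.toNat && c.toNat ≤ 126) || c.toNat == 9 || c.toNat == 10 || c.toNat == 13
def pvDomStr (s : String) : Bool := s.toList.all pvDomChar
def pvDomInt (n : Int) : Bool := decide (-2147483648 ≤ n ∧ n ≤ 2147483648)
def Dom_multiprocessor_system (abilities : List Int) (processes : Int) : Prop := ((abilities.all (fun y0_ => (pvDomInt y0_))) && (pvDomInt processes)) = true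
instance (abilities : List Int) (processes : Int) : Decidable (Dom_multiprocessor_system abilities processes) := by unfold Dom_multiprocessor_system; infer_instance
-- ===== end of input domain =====

-- B replaces A's max-heap simulation by precomputing every halving-chain value of the
-- abilities, sorting them once in descending order and doing a single accumulating pass
-- (alternative decomposition; A's popped maxima come out in exactly this order).

-- The halving chain a, a//2, a//4, … of a value while it stays positive (used by both ports).
-- The Nat fuel only makes the recursion structural; bitLength a is exactly the chain's length.
def halfChainAux : Nat → Int → List Int
  | 0, _ => []
  | fuel+1, a => if 0 < a then a :: halfChainAux fuel (PySem.Int.floordiv a 2) else []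

def halfChain (a : Int) : List Int := halfChainAux (PySem.Int.bitLength a) a

-- ===== PORT A =====
-- The heap stores the negated abilities; heappop is modelled as removing the minimum value
-- (exact for the return value: the steps depend only on the heap's multiset of values),
-- heappush as an append.  The fuel only makes the loop total; under Pre_ it never runs out,
-- and on fuel exhaustion (A diverges there) the current steps are returned.
def mpLoop : Nat → List Int → Int → Int → Int
  | 0, _, _, steps => steps
  | fuel+1, heap, processes, steps =>
    if 0 < processes then
      match PySem.List.min? heap (fun x => x) with
      | none => steps  -- heappop of an empty heap: IndexError (excluded by Pre_)
      | some m =>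
        let processor := -m
        mpLoop fuel ((heap.erase m) ++ [-(PySem.Int.floordiv processor 2)])
          (processes - processor) (steps + 1)
    else steps

def multiprocessor_system (abilities : List Int) (processes : Int) : Int :=
  mpLoop ((abilities.flatMap halfChain).length + 1) (abilities.map (fun a => -a)) processes 0

-- ===== PORT B =====
def bLoop : List Int → Int → Int → Int
  | [], _, steps => steps
  | v :: rest, processes, steps =>
    if processes ≤ 0 then steps else bLoop rest (processes - v) (steps + 1)

def multiprocessor_system_alt (abilities : List Int) (processes : Int) : Int :=
  bLoop (PySem.List.sorted (abilities.flatMap halfChain) (fun x => x) true) processes 0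

-- ===== PRECONDITION & SPEC =====
-- A returns exactly when `processes` is at most the total work the heap can ever supply,
-- i.e. the sum of all positive halving-chain values, whose closed form per ability a > 0 is
-- 2*a - popcount(a); on larger `processes` A loops forever (or raises IndexError on an
-- empty list), so those inputs are excluded.
def Pre_multiprocessor_system (abilities : List Int) (processes : Int) : Prop :=
  processes ≤ (abilities.map (fun a => if 0 < a then 2*a - (PySem.Int.bitCount a : Int) else 0)).sum
instance (abilities : List Int) (processes : Int) : Decidable (Pre_multiprocessor_system abilities processes) := by unfold Pre_multiprocessor_system; infer_instance

def pvWitness_multiprocessor_system : List Int × Int := ([3, -1], 4)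

def Spec_multiprocessor_system (abilities : List Int) (processes : Int) (out : Int) : Prop := out = multiprocessor_system_alt abilities processes
instance (abilities : List Int) (processes : Int) (out : Int) : Decidable (Spec_multiprocessor_system abilities processes out) := by unfold Spec_multiprocessor_system; infer_instance

-- ===== CLAIM (what is proved, stated in full; the proofs are below) =====
def Claim_equal_multiprocessor_system : Prop := ∀ (abilities : List Int) (processes : Int), Dom_multiprocessor_system abilities processes → Pre_multiprocessor_system abilities processes → Spec_multiprocessor_system abilities processes (multiprocessor_system abilities processes)

-- ===== LEMMAS AND PROOFS =====

lemma halfChain_of_pos {a : Int} (h : 0 < a) :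
    halfChain a = a :: halfChain (PySem.Int.floordiv a 2) := by
  unfold halfChain
  rw [PySem.Int.bitLength_of_pos h]
  simp [halfChainAux, h]

lemma halfChain_of_nonpos {a : Int} (h : ¬ 0 < a) : halfChain a = [] := by
  unfold halfChain
  cases PySem.Int.bitLength a with
  | zero => rfl
  | succ n => simp [halfChainAux, h]

lemma mem_halfChainAux_pos : ∀ (fuel : Nat) (a x : Int), x ∈ halfChainAux fuel a → 0 < x := by
  intro fuel
  induction fuel with
  | zero => intro a x hx; simp [halfChainAux] at hx
  | succ fuel ih =>
    intro a x hx
    by_cases h : 0 < a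
    · rw [halfChainAux, if_pos h] at hx
      rcases List.mem_cons.1 hx with rfl | hx'
      · exact h
      · exact ih _ _ hx'
    · rw [halfChainAux, if_neg h] at hx; simp at hx

lemma mem_halfChainAux_le : ∀ (fuel : Nat) (a x : Int), x ∈ halfChainAux fuel a → x ≤ a := by
  intro fuel
  induction fuel with
  | zero => intro a x hx; simp [halfChainAux] at hx
  | succ fuel ih =>
    intro a x hx
    by_cases h : 0 < a
    · rw [halfChainAux, if_pos h] at hx
      rcases List.mem_cons.1 hx with rfl | hx'
      · exact le_refl x
      · have := ih _ _ hx'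
        rw [PySem.Int.floordiv_eq_ediv_of_pos (by omega : (0:Int) < 2)] at this
        omega
    · rw [halfChainAux, if_neg h] at hx; simp at hx

lemma mem_halfChain_pos {x a : Int} (hx : x ∈ halfChain a) : 0 < x :=
  mem_halfChainAux_pos _ _ _ hx

lemma mem_halfChain_le {x a : Int} (hx : x ∈ halfChain a) : x ≤ a :=
  mem_halfChainAux_le _ _ _ hx

lemma self_mem_halfChain {a : Int} (h : 0 < a) : a ∈ halfChain a := by
  rw [halfChain_of_pos h]; exact List.mem_cons_self ..

lemma flatMap_chain_pos {x : Int} {heap : List Int}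
    (hx : x ∈ heap.flatMap (fun y => halfChain (-y))) : 0 < x := by
  rcases List.mem_flatMap.1 hx with ⟨y, _, hxy⟩
  exact mem_halfChain_pos hxy

-- The chain sum's closed form (named by Pre_): Σᵢ a»i, while positive, = 2a - popcount a.
lemma sum_halfChain_bound : ∀ (n : Nat) (a : Int), a.toNat ≤ n →
    (halfChain a).sum = if 0 < a then 2*a - (PySem.Int.bitCount a : Int) else 0 := by
  intro n
  induction n with
  | zero =>
    intro a h
    have h' : ¬ 0 < a := by omega
    simp [halfChain_of_nonpos h', h']
  | succ n ih =>
    intro a h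
    by_cases hpos : 0 < a
    · have hq : PySem.Int.floordiv a 2 = a / 2 :=
        PySem.Int.floordiv_eq_ediv_of_pos (by omega)
      rw [halfChain_of_pos hpos, List.sum_cons, ih (PySem.Int.floordiv a 2) (by rw [hq]; omega)]
      have hb : (PySem.Int.bitCount a : Int)
          = ((PySem.Int.mod a 2).toNat : Int) + (PySem.Int.bitCount (PySem.Int.floordiv a 2) : Int) := by
        rw [PySem.Int.bitCount_of_pos hpos]; push_cast; ring
      rw [PySem.Int.mod_eq_emod_of_pos (by omega : (0:Int) < 2)] at hb
      rw [Int.toNat_of_nonneg (by omega : 0 ≤ a % 2)] at hb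
      rw [hq] at hb ⊢
      by_cases hq2 : 0 < a / 2
      · rw [if_pos hq2, if_pos hpos]; omega
      · have ha1 : a = 1 := by omega
        subst ha1
        norm_num at hb ⊢
        omega
    · simp [halfChain_of_nonpos hpos, hpos]

lemma sum_halfChain (a : Int) :
    (halfChain a).sum = if 0 < a then 2*a - (PySem.Int.bitCount a : Int) else 0 :=
  sum_halfChain_bound a.toNat a (le_refl _)

lemma sum_flatMap_halfChain (abilities : List Int) :
    (abilities.flatMap halfChain).sum
      = (abilities.map (fun a => if 0 < a then 2*a - (PySem.Int.bitCount a : Int) else 0)).sum := by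
  induction abilities with
  | nil => rfl
  | cons a rest ih => simp [List.flatMap_cons, sum_halfChain, ih]

-- The core invariant: A's heap loop equals B's pass over any descending-sorted
-- permutation of the heap's chain values, while processes stays within their total.
lemma loop_eq (fuel : Nat) :
    ∀ (heap L : List Int) (p s : Int),
      L.Pairwise (fun a b => b ≤ a) →
      L.Perm (heap.flatMap (fun y => halfChain (-y))) →
      p ≤ L.sum →
      L.length < fuel →
      mpLoop fuel heap p s = bLoop L p s := by
  induction fuel with
  | zero => intro heap L p s _ _ _ hlen; omega
  | succ fuel ih =>
    intro heap L p s hsort hperm hple hlen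
    by_cases hp : 0 < p
    · -- L is nonempty since its sum is at least p > 0
      have hLne : L ≠ [] := by
        rintro rfl; simp at hple; omega
      obtain ⟨v, rest, rfl⟩ := List.exists_cons_of_ne_nil hLne
      have hvmem : v ∈ heap.flatMap (fun y => halfChain (-y)) :=
        hperm.mem_iff.mp (List.mem_cons_self ..)
      have hvpos : 0 < v := flatMap_chain_pos hvmem
      have hvmax : ∀ y ∈ v :: rest, y ≤ v := by
        intro y hy
        rcases List.mem_cons.1 hy with rfl | hy'
        · exact le_refl y
        · exact (List.pairwise_cons.1 hsort).1 y hy'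
      -- every heap value y satisfies -v ≤ y
      have hmin : ∀ y ∈ heap, -v ≤ y := by
        intro y hy
        by_cases hny : 0 < -y
        · have hmem : -y ∈ heap.flatMap (fun z => halfChain (-z)) :=
            List.mem_flatMap.2 ⟨y, hy, by simpa using self_mem_halfChain hny⟩
          have := hvmax _ (hperm.mem_iff.mpr hmem)
          omega
        · omega
      -- -v is in the heap
      have hnegmem : (-v) ∈ heap := by
        rcases List.mem_flatMap.1 hvmem with ⟨y, hy, hvy⟩
        have h1 : v ≤ -y := mem_halfChain_le hvy
        have h2 : -v ≤ y := hmin y hy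
        have : y = -v := by omega
        rwa [this] at hy
      -- min? returns exactly -v
      have hne : heap ≠ [] := List.ne_nil_of_mem hnegmem
      obtain ⟨m, hm⟩ : ∃ m, PySem.List.min? heap (fun x => x) = some m := by
        cases hmm : PySem.List.min? heap (fun x => x) with
        | none => exact absurd ((PySem.List.min?_eq_none_iff heap _).1 hmm) hne
        | some m => exact ⟨m, rfl⟩
      have hmval : m = -v := by
        have h1 : m ≤ -v := PySem.List.min?_isMin hm _ hnegmem
        have h2 : -v ≤ m := hmin m (PySem.List.min?_mem hm)
        omega
      subst hmval
      -- unfold one step of each loop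
      rw [mpLoop, hm]
      simp only [hp, if_pos, neg_neg]
      rw [bLoop, if_neg (by omega)]
      -- the new heap's chain values are a permutation of rest
      have hh : heap.Perm ((-v) :: heap.erase (-v)) := List.perm_cons_erase hnegmem
      have hflat : (heap.flatMap (fun y => halfChain (-y))).Perm
          (v :: (halfChain (PySem.Int.floordiv v 2) ++ (heap.erase (-v)).flatMap (fun y => halfChain (-y)))) := by
        have h3 := hh.flatMap_right (fun y => halfChain (-y))
        rw [List.flatMap_cons, neg_neg, halfChain_of_pos hvpos, List.cons_append] at h3
        exact h3
      have hrest : rest.Perm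
          (halfChain (PySem.Int.floordiv v 2) ++ (heap.erase (-v)).flatMap (fun y => halfChain (-y))) :=
        (hperm.trans hflat).cons_inv
      have hnew : rest.Perm
          ((heap.erase (-v) ++ [-(PySem.Int.floordiv v 2)]).flatMap (fun y => halfChain (-y))) := by
        rw [List.flatMap_append, List.flatMap_cons, neg_neg, List.flatMap_nil, List.append_nil]
        exact hrest.trans (List.perm_append_comm)
      refine ih _ _ _ _ ((List.pairwise_cons.1 hsort).2) hnew ?_ ?_
      · have hs : (v :: rest).sum = v + rest.sum := by simp
        omega
      · simp at hlen ⊢; omega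
    · rw [mpLoop, if_neg hp]
      cases L with
      | nil => rw [bLoop]
      | cons v rest => rw [bLoop, if_pos (by omega)]

-- ===== VERDICT (by name: the statement is the Claim_ definition above) =====
theorem multiprocessor_system_spec : Claim_equal_multiprocessor_system := by
  intro abilities processes _ hpre
  unfold Spec_multiprocessor_system multiprocessor_system multiprocessor_system_alt
  have hmapflat : (abilities.map (fun a => -a)).flatMap (fun y => halfChain (-y))
      = abilities.flatMap halfChain := by
    rw [List.flatMap_map]; simp
  apply loop_eq
  · exact PySem.List.sorted_pairwise_rev ..
  · rw [hmapflat]; exact PySem.List.sorted_perm ..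
  · rw [(PySem.List.sorted_perm (abilities.flatMap halfChain) (fun x => x) true).sum_eq]
    rw [sum_flatMap_halfChain]
    exact hpre
  · rw [PySem.List.length_sorted]; omega
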